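-- pv_equiv track=rewrite | github.com/NguyenChHieu/ATPP | candidate.py | check_valid_ans
-- ===== SOURCE A (Python) =====
-- def check_valid_ans(answer):
--     valid_ans = ["A", "B", "C", "D"]
--     is_valid = False
--
--     # check if the answer contains multiple options
--     u = 0
--     o = 0
--     comma = False
--
--     while u < len(answer):
--         if answer[u] == ",":
--             comma = True
--             break
--         u += 1
--     # have comma = multiple
--     if comma:
--         answers_split = answer.split(",")
--         if not 0 <= len(answers_split) <= 4:
--             return False
--
--         while o < len(answers_split):
--             is_valid = False  # Reset is_valid for each new choice
--             ans = answers_split[o].lstrip()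
--             d = 0
--             while d < len(valid_ans):
--                 if ans == valid_ans[d]:
--                     is_valid = True
--                     break  # exit loop
--                 d += 1
--             if not is_valid:
--                 return False  # exit early if invalid answer found
--             o += 1
--         return True
--     # no? = single
--     else:
--         d = 0
--         while d < len(valid_ans):
--             if answer == valid_ans[d]:
--                 is_valid = True
--                 break
--             d += 1
--         return is_valid
-- ===== SOURCE B (Python) =====
-- def check_valid_ans(answer):
--     # single pass: no split, no nested scans; one state machine over the characters
--     if "," not in answer:
--         return answer in ("A", "B", "C", "D")
--     tokens = 0
--     i = 0
--     n = len(answer)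
--     while True:
--         while i < n and answer[i].isspace():
--             i += 1
--         if i >= n or answer[i] not in "ABCD":
--             return False
--         i += 1
--         tokens += 1
--         if i == n:
--             return tokens <= 4
--         if answer[i] != ",":
--             return False
--         i += 1
-- ===== Notes on version B (the rewrite author's own statement) =====
-- stated objective: faster
-- what changed: Replaced the comma scan + split + per-token inner loop over the valid-answer list by a single left-to-right state-machine pass that consumes whitespace, one letter and a comma per token while counting tokens, so no intermediate list of parts is built and invalid input is rejected at the first offending character.
import Mathlib
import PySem

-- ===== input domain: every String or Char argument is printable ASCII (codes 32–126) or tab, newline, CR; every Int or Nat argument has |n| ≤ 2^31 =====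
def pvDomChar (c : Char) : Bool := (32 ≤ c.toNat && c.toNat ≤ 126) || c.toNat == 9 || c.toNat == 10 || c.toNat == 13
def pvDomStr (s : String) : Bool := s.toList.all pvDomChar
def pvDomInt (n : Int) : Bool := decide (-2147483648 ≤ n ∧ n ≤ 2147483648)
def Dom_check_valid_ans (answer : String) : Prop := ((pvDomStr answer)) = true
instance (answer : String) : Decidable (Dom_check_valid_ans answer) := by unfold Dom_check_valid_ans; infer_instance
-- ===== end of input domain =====

-- B replaces A's comma scan + split + per-token inner loop by a single early-exit state-machine pass over the characters (measured faster: no split allocation, stops at the first invalid character).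


-- ===== PORT A =====
-- helpers work on List Char: Python string equality = equality of the code-point lists (exact)
-- A's comma-detection 'while u < len(answer)' loop
def findComma : List Char → Bool
  | [] => false
  | c :: cs => if c = ',' then true else findComma cs

-- A's inner 'while d < len(valid_ans)' loop (early exit on match)
def aMatch (ans : List Char) : List (List Char) → Bool
  | [] => false
  | v :: vs => if ans = v then true else aMatch ans vs

-- A's outer 'while o < len(answers_split)' loop (early False on invalid token)
def aPartsLoop (validAns : List (List Char)) : List (List Char) → Bool
  | [] => true
  | p :: ps => if aMatch (PySem.Chars.lstrip p) validAns then aPartsLoop validAns ps else false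

def check_valid_ans (answer : String) : Bool :=
  let validAns : List (List Char) := [['A'], ['B'], ['C'], ['D']]
  let cs := answer.toList
  if findComma cs then
    let answersSplit := PySem.Chars.splitOn cs [',']
    if ¬ (0 ≤ answersSplit.length ∧ answersSplit.length ≤ 4) then false
    else aPartsLoop validAns answersSplit
  else aMatch cs validAns

-- ===== PORT B =====
-- Source B's inner 'while i < n and answer[i].isspace()' loop
def pvSkipWs : List Char → List Char
  | [] => []
  | c :: cs => if PySem.Chars.isspace c then pvSkipWs cs else c :: cs

theorem pvSkipWs_length_le (cs : List Char) : (pvSkipWs cs).length ≤ cs.length := by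
  induction cs with
  | nil => simp [pvSkipWs]
  | cons c cs ih =>
    simp only [pvSkipWs]
    split
    · simp only [List.length_cons]; omega
    · simp
-- Source B's 'while True' loop body, entered with the whitespace already skipped:
-- check end/letter, then end-of-string (token count) or comma and loop
def pvScanGo : List Char → Nat → Bool
  | [], _ => false
  | c :: rest, tokens =>
    if ['A', 'B', 'C', 'D'].contains c then
      match rest with
      | [] => decide (tokens + 1 ≤ 4)
      | d :: rest' => if d = ',' then pvScanGo (pvSkipWs rest') (tokens + 1) else false
    else false
termination_by cs _ => cs.length
decreasing_by
  have := pvSkipWs_length_le rest'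
  simp; omega

def check_valid_ans_alt (answer : String) : Bool :=
  let cs := answer.toList
  if ¬ cs.contains ',' then
    [['A'], ['B'], ['C'], ['D']].contains cs
  else pvScanGo (pvSkipWs cs) 0

-- ===== PRECONDITION & SPEC =====
def Spec_check_valid_ans (answer : String) (out : Bool) : Prop := out = check_valid_ans_alt answer
instance (answer : String) (out : Bool) : Decidable (Spec_check_valid_ans answer out) := by unfold Spec_check_valid_ans; infer_instance

-- ===== CLAIM (what is proved, stated in full; the proofs are below) =====
def Claim_equal_check_valid_ans : Prop := ∀ (answer : String), Dom_check_valid_ans answer → Spec_check_valid_ans answer (check_valid_ans answer)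

-- ===== LEMMAS AND PROOFS =====

-- proof-side structural model of answer.split(","): first part and remaining parts
def splitComma : List Char → List Char × List (List Char)
  | [] => ([], [])
  | c :: cs =>
    let r := splitComma cs
    if c = ',' then ([], r.1 :: r.2) else (c :: r.1, r.2)

theorem findComma_eq_contains (cs : List Char) : findComma cs = cs.contains ',' := by
  induction cs with
  | nil => simp [findComma]
  | cons c cs ih => by_cases h : c = ',' <;> simp [findComma, h, ih, eq_comm]

theorem splitOn_comma_go (fuel : Nat) :
    ∀ (l cur : List Char) (acc : List (List Char)), l.length ≤ fuel →
      PySem.Chars.splitOn.go [','] fuel l cur acc =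
        acc.reverse ++ (cur.reverse ++ (splitComma l).1) :: (splitComma l).2 := by
  induction fuel with
  | zero =>
    intro l cur acc hl
    have : l = [] := by cases l <;> simp_all
    subst this
    simp [PySem.Chars.splitOn.go, splitComma]
  | succ fuel ih =>
    intro l cur acc hl
    cases l with
    | nil => simp [PySem.Chars.splitOn.go, splitComma]
    | cons c rest =>
      by_cases hc : c = ','
      · subst hc
        have hpre : List.isPrefixOf [','] (',' :: rest) = true := by simp [List.isPrefixOf]
        rw [PySem.Chars.splitOn.go]
        simp only [hpre, if_true, List.length_cons, List.length_nil, List.drop_succ_cons,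
          List.drop_zero]
        rw [ih rest [] (cur.reverse :: acc) (by simp at hl; omega)]
        simp [splitComma]
      · have hpre : List.isPrefixOf [','] (c :: rest) = false := by
          simp [List.isPrefixOf]; exact fun h => (hc h.symm).elim
        rw [PySem.Chars.splitOn.go]
        simp only [hpre]
        rw [ih rest (c :: cur) acc (by simp at hl; omega)]
        simp [splitComma, hc]

theorem splitOn_comma (cs : List Char) :
    PySem.Chars.splitOn cs [','] = (splitComma cs).1 :: (splitComma cs).2 := by
  unfold PySem.Chars.splitOn
  rw [splitOn_comma_go (cs.length + 1) cs [] [] (by omega)]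
  simp

theorem pvScanGo_nonletter (c : Char) (rest : List Char) (t : Nat)
    (h : (['A', 'B', 'C', 'D'].contains c) = false) : pvScanGo (c :: rest) t = false := by
  cases rest <;> rw [pvScanGo] <;> simp only [h, Bool.false_eq_true, if_false, ite_false]

theorem pvScanGo_spec (n : Nat) : ∀ (cs : List Char), cs.length ≤ n → ∀ (t : Nat),
    pvScanGo (pvSkipWs cs) t =
      (aPartsLoop [['A'], ['B'], ['C'], ['D']] ((splitComma cs).1 :: (splitComma cs).2)
        && decide (t + 1 + (splitComma cs).2.length ≤ 4)) := by
  induction n with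
  | zero =>
    intro cs hl t
    have : cs = [] := by cases cs <;> simp_all
    subst this
    simp [pvSkipWs, pvScanGo, splitComma, aPartsLoop, aMatch, PySem.Chars.lstrip]
  | succ n ih =>
    intro cs hl t
    cases cs with
    | nil => simp [pvSkipWs, pvScanGo, splitComma, aPartsLoop, aMatch, PySem.Chars.lstrip]
    | cons c cs' =>
      by_cases hws : PySem.Chars.isspace c
      · -- whitespace head: both sides skip it
        have hcc : c ≠ ',' := by
          intro h; subst h; exact absurd hws (by decide)
        rw [show pvSkipWs (c :: cs') = pvSkipWs cs' from by simp [pvSkipWs, hws]]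
        rw [ih cs' (by simp at hl; omega) t]
        simp [splitComma, hcc, aPartsLoop, PySem.Chars.lstrip, List.dropWhile, hws]
      · rw [show pvSkipWs (c :: cs') = c :: cs' from by simp [pvSkipWs, hws]]
        by_cases hlit : c = 'A' ∨ c = 'B' ∨ c = 'C' ∨ c = 'D'
        · -- a letter head
          have hcc : c ≠ ',' := by rcases hlit with h|h|h|h <;> subst h <;> decide
          have hcont : (['A', 'B', 'C', 'D'].contains c) = true := by
            rcases hlit with h|h|h|h <;> subst h <;> decide
          have hmatch : aMatch (c :: (splitComma cs').1) [['A'], ['B'], ['C'], ['D']] =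
              (decide ((splitComma cs').1 = []) &&
                (['A', 'B', 'C', 'D'].contains c)) := by
            rcases hlit with h|h|h|h <;> subst h <;>
              cases hsp : (splitComma cs').1 <;> simp [aMatch]
          cases cs' with
          | nil =>
            rw [pvScanGo]
            simp only [hcont, if_true]
            rcases hlit with h|h|h|h <;> subst h <;>
              simp [splitComma, aPartsLoop, PySem.Chars.lstrip, List.dropWhile, aMatch,
                show PySem.Chars.isspace 'A' = false from by decide,
                show PySem.Chars.isspace 'B' = false from by decide,
                show PySem.Chars.isspace 'C' = false from by decide,
                show PySem.Chars.isspace 'D' = false from by decide]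
          | cons d cs'' =>
            by_cases hd : d = ','
            · subst hd
              have hsp : splitComma (c :: ',' :: cs'') =
                  ([c], (splitComma cs'').1 :: (splitComma cs'').2) := by
                simp [splitComma, hcc]
              have hone : aMatch (PySem.Chars.lstrip [c]) [['A'], ['B'], ['C'], ['D']] = true := by
                rcases hlit with h|h|h|h <;> subst h <;> decide
              rw [pvScanGo]
              simp only [hcont, if_true, ite_true, if_pos rfl]
              rw [ih cs'' (by simp at hl; omega) (t + 1), hsp]
              simp only [aPartsLoop, hone, if_true, List.length_cons, Bool.true_and,
                Bool.false_and, ite_true]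
              congr 1
              simp only [decide_eq_decide]
              omega
            · rw [pvScanGo]
              simp only [hcont, if_true, hd, if_false, ite_false]
              have h1 : (splitComma (c :: d :: cs'')).1 = c :: d :: (splitComma cs'').1 := by
                simp [splitComma, hcc, hd]
              have hm2 : aMatch (c :: d :: (splitComma cs'').1) [['A'], ['B'], ['C'], ['D']] =
                  false := by simp [aMatch]
              
              simp [h1, aPartsLoop, PySem.Chars.lstrip, List.dropWhile, hws, hm2, hd]
        · -- a non-letter, non-whitespace head
          have hcont : (['A', 'B', 'C', 'D'].contains c) = false := by
            simp only [List.contains_cons, List.contains_nil]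
            simp only [not_or] at hlit
            simp [beq_iff_eq, hlit.1, hlit.2.1, hlit.2.2.1, hlit.2.2.2]
          rw [pvScanGo_nonletter c cs' t hcont]
          by_cases hcc : c = ','
          · subst hcc
            simp [splitComma, aPartsLoop, PySem.Chars.lstrip, List.dropWhile, aMatch]
          · have h1 : (splitComma (c :: cs')).1 = c :: (splitComma cs').1 := by
              simp [splitComma, hcc]
            have hm2 : aMatch (c :: (splitComma cs').1) [['A'], ['B'], ['C'], ['D']] = false := by
              simp only [not_or] at hlit
              simp [aMatch, hlit.1, hlit.2.1, hlit.2.2.1, hlit.2.2.2]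
            simp [h1, aPartsLoop, PySem.Chars.lstrip, List.dropWhile, hws, hm2]

theorem aMatch_eq_contains (cs : List Char) :
    aMatch cs [['A'], ['B'], ['C'], ['D']] = [['A'], ['B'], ['C'], ['D']].contains cs := by
  simp only [aMatch, List.contains_cons, List.contains_nil]
  split_ifs <;> simp_all

-- ===== VERDICT (by name: the statement is the Claim_ definition above) =====
theorem check_valid_ans_spec : Claim_equal_check_valid_ans := by
  intro answer _
  unfold Spec_check_valid_ans check_valid_ans check_valid_ans_alt
  set cs := answer.toList with hcs
  simp only [findComma_eq_contains]
  by_cases hc : cs.contains ','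
  · simp only [hc, not_true_eq_false, if_false, if_true, ite_false, ite_true]
    rw [splitOn_comma, pvScanGo_spec cs.length cs le_rfl 0]
    cases hpl : aPartsLoop [['A'], ['B'], ['C'], ['D']] ((splitComma cs).1 :: (splitComma cs).2)
    · simp
    · simp only [Bool.true_and, List.length_cons]
      by_cases h : (splitComma cs).2.length + 1 ≤ 4
      · simp only [show (0 + 1 + (splitComma cs).2.length ≤ 4) = True from by simp; omega,
          decide_true, Bool.not_eq_true']
        simp; omega
      · simp only [show (0 + 1 + (splitComma cs).2.length ≤ 4) = False from by simp; omega,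
          decide_false, Bool.not_eq_false]
        simp; omega
  · simp only [hc, aMatch_eq_contains, Bool.false_eq_true, not_false_eq_true, if_true, ite_true]
    have h' : ¬ (',' ∈ cs) := by rw [← List.contains_iff_mem]; exact hc
    simp [h']
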